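-- pv_equiv track=rewrite | github.com/noszczynski/routes | apps/routing-engine/src/routing_engine/osm_loader.py | _iter_ring
-- ===== SOURCE A (Python) =====
-- from typing import Iterable
--
-- def _iter_ring(
--
-- 	origin: tuple[int, int],
-- 	ring: int,
-- ) -> Iterable[tuple[int, int]]:
-- 	if ring == 0:
-- 		yield origin
-- 		return
--
-- 	lat_origin, lon_origin = origin
-- 	for lat_delta in range(-ring, ring + 1):
-- 		for lon_delta in range(-ring, ring + 1):
-- 			if abs(lat_delta) != ring and abs(lon_delta) != ring:
-- 				continue
-- 			yield (lat_origin + lat_delta, lon_origin + lon_delta)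
-- ===== SOURCE B (Python) =====
-- def _iter_ring(origin, ring):
--     if ring == 0:
--         yield origin
--         return
--     lat_origin, lon_origin = origin
--     # top row: all columns
--     for lon_delta in range(-ring, ring + 1):
--         yield (lat_origin - ring, lon_origin + lon_delta)
--     # middle rows: only the two edge columns
--     for lat_delta in range(-ring + 1, ring):
--         yield (lat_origin + lat_delta, lon_origin - ring)
--         yield (lat_origin + lat_delta, lon_origin + ring)
--     # bottom row: all columns
--     for lon_delta in range(-ring, ring + 1):
--         yield (lat_origin + ring, lon_origin + lon_delta)
-- ===== Notes on version B (the rewrite author's own statement) =====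
-- stated objective: faster
-- what changed: Instead of scanning the full (2*ring+1)^2 square and filtering for perimeter cells, B emits the perimeter directly: the full top row, only the two edge cells of each middle row, then the full bottom row.
import Mathlib
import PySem

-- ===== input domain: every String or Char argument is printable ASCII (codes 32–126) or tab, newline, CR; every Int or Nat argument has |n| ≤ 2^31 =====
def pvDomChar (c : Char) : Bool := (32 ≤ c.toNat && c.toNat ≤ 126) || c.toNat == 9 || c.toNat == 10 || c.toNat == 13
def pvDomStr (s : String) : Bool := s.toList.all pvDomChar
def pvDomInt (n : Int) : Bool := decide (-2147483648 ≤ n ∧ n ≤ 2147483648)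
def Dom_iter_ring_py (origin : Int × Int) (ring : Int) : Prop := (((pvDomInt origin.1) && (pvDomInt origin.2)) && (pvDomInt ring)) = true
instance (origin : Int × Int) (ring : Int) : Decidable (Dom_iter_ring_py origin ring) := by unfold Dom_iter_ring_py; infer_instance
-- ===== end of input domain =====

-- B emits the square-ring perimeter directly (top row, edge cells of middle rows, bottom row)
-- instead of scanning the whole square and filtering; equivalence of the two is proved below.


-- ===== PORT A =====
-- literal transliteration of A: nested loops over the full square, skipping interior cells
def iter_ring_py (origin : Int × Int) (ring : Int) : List (Int × Int) :=
  if ring = 0 then [origin]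
  else
    let lat_origin := origin.1
    let lon_origin := origin.2
    (PySem.List.pyRange (-ring) (ring + 1) 1).foldl (fun acc lat_delta =>
      (PySem.List.pyRange (-ring) (ring + 1) 1).foldl (fun acc2 lon_delta =>
        if |lat_delta| ≠ ring ∧ |lon_delta| ≠ ring then acc2
        else acc2 ++ [(lat_origin + lat_delta, lon_origin + lon_delta)]) acc) []

-- ===== PORT B =====
-- literal transliteration of B: top row, middle edge pairs, bottom row
def iter_ring_py_alt (origin : Int × Int) (ring : Int) : List (Int × Int) :=
  if ring = 0 then [origin]
  else
    let lat_origin := origin.1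
    let lon_origin := origin.2
    let top := (PySem.List.pyRange (-ring) (ring + 1) 1).foldl
      (fun acc lon_delta => acc ++ [(lat_origin - ring, lon_origin + lon_delta)]) []
    let mid := (PySem.List.pyRange (-ring + 1) ring 1).foldl
      (fun acc lat_delta =>
        acc ++ [(lat_origin + lat_delta, lon_origin - ring),
                (lat_origin + lat_delta, lon_origin + ring)]) top
    (PySem.List.pyRange (-ring) (ring + 1) 1).foldl
      (fun acc lon_delta => acc ++ [(lat_origin + ring, lon_origin + lon_delta)]) mid

-- ===== PRECONDITION & SPEC =====
def Spec_iter_ring_py (origin : Int × Int) (ring : Int) (out : List (Int × Int)) : Prop := out = iter_ring_py_alt origin ring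
instance (origin : Int × Int) (ring : Int) (out : List (Int × Int)) : Decidable (Spec_iter_ring_py origin ring out) := by unfold Spec_iter_ring_py; infer_instance

-- ===== CLAIM (what is proved, stated in full; the proofs are below) =====
def Claim_equal_iter_ring_py : Prop := ∀ (origin : Int × Int) (ring : Int), Dom_iter_ring_py origin ring → Spec_iter_ring_py origin ring (iter_ring_py origin ring)

-- ===== LEMMAS AND PROOFS =====

-- A's inner loop, as "append unless skipped" rewritten to "append if kept"
theorem pv_inner_shape (la lo r lat : Int) (acc : List (Int × Int)) :
    (PySem.List.pyRange (-r) (r + 1) 1).foldl (fun acc2 lon =>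
        if |lat| ≠ r ∧ |lon| ≠ r then acc2 else acc2 ++ [(la + lat, lo + lon)]) acc
    = acc ++ ((PySem.List.pyRange (-r) (r + 1) 1).filter
        (fun lon => decide (¬(|lat| ≠ r ∧ |lon| ≠ r)))).map (fun lon => (la + lat, lo + lon)) := by
  have hfun : (fun (acc2 : List (Int × Int)) (lon : Int) =>
      if |lat| ≠ r ∧ |lon| ≠ r then acc2 else acc2 ++ [(la + lat, lo + lon)])
      = (fun acc2 lon => if ¬(|lat| ≠ r ∧ |lon| ≠ r) then acc2 ++ [(la + lat, lo + lon)] else acc2) := by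
    funext acc2 lon
    by_cases h : |lat| ≠ r ∧ |lon| ≠ r <;> simp [h]
  rw [hfun]
  exact PySem.List.foldl_append_ite _ _ _ _

-- the kept columns of an edge row (|lat| = r): all of them
theorem pv_filter_edge (r lat : Int) (h : |lat| = r) :
    (PySem.List.pyRange (-r) (r + 1) 1).filter (fun lon => decide (¬(|lat| ≠ r ∧ |lon| ≠ r)))
    = PySem.List.pyRange (-r) (r + 1) 1 := by
  apply List.filter_eq_self.mpr
  intro x _
  simp [h]

-- the kept columns of a middle row (|lat| ≠ r, 0 < r): exactly the two edges
theorem pv_filter_mid (r lat : Int) (hr : 0 < r) (h : |lat| ≠ r) :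
    (PySem.List.pyRange (-r) (r + 1) 1).filter (fun lon => decide (¬(|lat| ≠ r ∧ |lon| ≠ r)))
    = [-r, r] := by
  have hsplit : PySem.List.pyRange (-r) (r + 1) 1
      = PySem.List.pyRange (-r) (-r + 1) 1 ++ (PySem.List.pyRange (-r + 1) r 1
        ++ PySem.List.pyRange r (r + 1) 1) := by
    rw [PySem.List.pyRange_one_append (-r) (-r + 1) (r + 1) (by omega) (by omega),
        PySem.List.pyRange_one_append (-r + 1) r (r + 1) (by omega) (by omega)]
  rw [hsplit, List.filter_append, List.filter_append,
      PySem.List.pyRange_one_singleton, PySem.List.pyRange_one_singleton]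
  have hmid : (PySem.List.pyRange (-r + 1) r 1).filter
      (fun lon => decide (¬(|lat| ≠ r ∧ |lon| ≠ r))) = [] := by
    apply List.filter_eq_nil_iff.mpr
    intro x hx
    rw [PySem.List.mem_pyRange_one] at hx
    have : |x| < r := abs_lt.mpr ⟨by omega, by omega⟩
    simp [h, ne_of_lt this]
  rw [hmid]
  have h1 : |(-r)| = r := by rw [abs_neg]; exact abs_of_pos hr
  have h2 : |r| = r := abs_of_pos hr
  simp [h, h1, h2]

-- rows of A, as a function of lat_delta
theorem pv_A_flatMap (la lo r : Int) :
    ((PySem.List.pyRange (-r) (r + 1) 1).foldl (fun acc lat =>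
      (PySem.List.pyRange (-r) (r + 1) 1).foldl (fun acc2 lon =>
        if |lat| ≠ r ∧ |lon| ≠ r then acc2 else acc2 ++ [(la + lat, lo + lon)]) acc) [])
    = (PySem.List.pyRange (-r) (r + 1) 1).flatMap (fun lat =>
        ((PySem.List.pyRange (-r) (r + 1) 1).filter
          (fun lon => decide (¬(|lat| ≠ r ∧ |lon| ≠ r)))).map (fun lon => (la + lat, lo + lon))) := by
  have : (fun (acc : List (Int × Int)) (lat : Int) =>
      (PySem.List.pyRange (-r) (r + 1) 1).foldl (fun acc2 lon =>
        if |lat| ≠ r ∧ |lon| ≠ r then acc2 else acc2 ++ [(la + lat, lo + lon)]) acc)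
      = (fun acc lat => acc ++ ((PySem.List.pyRange (-r) (r + 1) 1).filter
          (fun lon => decide (¬(|lat| ≠ r ∧ |lon| ≠ r)))).map (fun lon => (la + lat, lo + lon))) := by
    funext acc lat
    exact pv_inner_shape la lo r lat acc
  rw [this]
  exact PySem.List.foldl_append_eq_flatMap _ _ _

-- ===== VERDICT (by name: the statement is the Claim_ definition above) =====
theorem iter_ring_py_spec : Claim_equal_iter_ring_py := by
  intro origin ring _
  unfold Spec_iter_ring_py iter_ring_py iter_ring_py_alt
  by_cases h0 : ring = 0
  · simp [h0]
  · simp only [h0, if_false]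
    obtain ⟨la, lo⟩ := origin
    by_cases hneg : ring < 0
    · rw [PySem.List.pyRange_one_eq_nil (by omega), PySem.List.pyRange_one_eq_nil (by omega)]
      simp
    · have hr : 0 < ring := by omega
      simp only []
      rw [pv_A_flatMap la lo ring]
      rw [PySem.List.foldl_append_singleton_eq_map, PySem.List.foldl_append_eq_flatMap,
          PySem.List.foldl_append_singleton_eq_map]
      have hsplit : PySem.List.pyRange (-ring) (ring + 1) 1
          = PySem.List.pyRange (-ring) (-ring + 1) 1 ++ (PySem.List.pyRange (-ring + 1) ring 1
            ++ PySem.List.pyRange ring (ring + 1) 1) := by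
        rw [PySem.List.pyRange_one_append (-ring) (-ring + 1) (ring + 1) (by omega) (by omega),
            PySem.List.pyRange_one_append (-ring + 1) ring (ring + 1) (by omega) (by omega)]
      have hstep : (PySem.List.pyRange (-ring) (ring + 1) 1).flatMap (fun lat =>
            ((PySem.List.pyRange (-ring) (ring + 1) 1).filter
              (fun lon => decide (¬(|lat| ≠ ring ∧ |lon| ≠ ring)))).map (fun lon => (la + lat, lo + lon)))
          = (PySem.List.pyRange (-ring) (-ring + 1) 1 ++ (PySem.List.pyRange (-ring + 1) ring 1
              ++ PySem.List.pyRange ring (ring + 1) 1)).flatMap (fun lat =>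
            ((PySem.List.pyRange (-ring) (ring + 1) 1).filter
              (fun lon => decide (¬(|lat| ≠ ring ∧ |lon| ≠ ring)))).map (fun lon => (la + lat, lo + lon))) := by
        rw [← hsplit]
      rw [hstep, List.flatMap_append, List.flatMap_append,
          PySem.List.pyRange_one_singleton, PySem.List.pyRange_one_singleton,
          List.flatMap_singleton, List.flatMap_singleton]
      have htop : |(-ring)| = ring := by rw [abs_neg]; exact abs_of_pos hr
      have hbot : |ring| = ring := abs_of_pos hr
      rw [pv_filter_edge ring (-ring) htop, pv_filter_edge ring ring hbot]
      have hmid : (PySem.List.pyRange (-ring + 1) ring 1).flatMap (fun lat =>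
          ((PySem.List.pyRange (-ring) (ring + 1) 1).filter
            (fun lon => decide (¬(|lat| ≠ ring ∧ |lon| ≠ ring)))).map (fun lon => (la + lat, lo + lon)))
          = (PySem.List.pyRange (-ring + 1) ring 1).flatMap (fun lat =>
              [(la + lat, lo - ring), (la + lat, lo + ring)]) := by
        apply List.flatMap_congr
        intro lat hlat
        rw [PySem.List.mem_pyRange_one] at hlat
        have hne : |lat| ≠ ring := by
          have : |lat| < ring := abs_lt.mpr ⟨by omega, by omega⟩
          exact ne_of_lt this
        rw [pv_filter_mid ring lat hr hne]
        simp [Int.sub_eq_add_neg]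
      rw [hmid]
      simp [Int.sub_eq_add_neg, List.append_assoc]
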